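-- pv_equiv track=rewrite | github.com/honey-lee/Algorithm---Programmers | Python - Level1/부족한 금액 계산하기(1주차 위클리 챌린지)/부족한 금액 계산하기.py | solution
-- ===== SOURCE A (Python) =====
-- def solution(price, money, count):
--     total_price = 0
--
--     for i in range(1, count + 1):
--         total_price += price * i
--
--     if total_price <= money:
--         return 1
--     else:
--         return total_price - money
-- ===== SOURCE B (Python) =====
-- def solution(price, money, count):
--     n = count if count > 0 else 0
--     total = price * n * (n + 1) // 2
--     return 1 if total <= money else total - money
-- ===== Notes on version B (the rewrite author's own statement) =====
-- stated objective: faster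
-- what changed: replaced the O(count) accumulation loop by the closed-form triangular-number formula price*n*(n+1)//2
import Mathlib
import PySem

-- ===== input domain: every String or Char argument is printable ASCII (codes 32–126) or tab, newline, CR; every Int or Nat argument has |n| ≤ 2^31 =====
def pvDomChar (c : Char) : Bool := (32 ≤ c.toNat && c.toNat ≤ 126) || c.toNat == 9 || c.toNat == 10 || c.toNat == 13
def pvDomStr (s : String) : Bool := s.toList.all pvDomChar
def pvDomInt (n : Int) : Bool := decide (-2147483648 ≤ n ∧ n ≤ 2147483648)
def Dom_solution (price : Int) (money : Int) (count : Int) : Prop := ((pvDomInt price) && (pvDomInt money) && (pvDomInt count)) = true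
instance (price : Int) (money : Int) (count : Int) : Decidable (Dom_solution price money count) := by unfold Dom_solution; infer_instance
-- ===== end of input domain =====

-- B replaces A's O(count) accumulation loop with the closed-form triangular sum price*n*(n+1)//2 (O(1)).


-- ===== PORT A =====
def solution (price : Int) (money : Int) (count : Int) : Int :=
  let total_price := (PySem.List.pyRange 1 (count + 1) 1).foldl (fun t i => t + price * i) 0
  if total_price ≤ money then 1 else total_price - money

-- ===== PORT B =====
def solution_alt (price : Int) (money : Int) (count : Int) : Int :=
  let n := if count > 0 then count else 0
  let total := PySem.Int.floordiv (price * n * (n + 1)) 2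
  if total ≤ money then 1 else total - money

-- ===== PRECONDITION & SPEC =====
def Spec_solution (price : Int) (money : Int) (count : Int) (out : Int) : Prop := out = solution_alt price money count
instance (price : Int) (money : Int) (count : Int) (out : Int) : Decidable (Spec_solution price money count out) := by unfold Spec_solution; infer_instance

-- ===== CLAIM (what is proved, stated in full; the proofs are below) =====
def Claim_equal_solution : Prop := ∀ (price : Int) (money : Int) (count : Int), Dom_solution price money count → Spec_solution price money count (solution price money count)

-- ===== LEMMAS AND PROOFS =====

theorem pv_foldl_tri (price : Int) (m : Nat) (a : Int) :
    (List.range m).foldl (fun (t : Int) (k : Nat) => t + price * (1 + (k : Int))) a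
      = a + price * m * (m + 1) / 2 := by
  induction m generalizing a with
  | zero => simp
  | succ m ih =>
    rw [List.range_succ, List.foldl_append]
    simp only [List.foldl_cons, List.foldl_nil]
    rw [ih]
    have key : price * (((m:Int))+1) * ((((m:Int))+1) + 1)
        = price * (m:Int) * ((m:Int)+1) + price * (1 + (m:Int)) * 2 := by ring
    push_cast
    rw [key, Int.add_mul_ediv_right _ _ (by norm_num : (2:Int) ≠ 0)]
    ring

theorem pv_sum_eq (price count : Int) :
    (PySem.List.pyRange 1 (count + 1) 1).foldl (fun t i => t + price * i) 0
      = PySem.Int.floordiv (price * (if count > 0 then count else 0) * ((if count > 0 then count else 0) + 1)) 2 := by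
  rw [PySem.List.pyRange_one, List.foldl_map]
  have hn : (if count > 0 then count else 0) = (count.toNat : Int) := by
    split_ifs with h <;> omega
  have ht : (count + 1 - 1).toNat = count.toNat := by omega
  rw [ht, hn, pv_foldl_tri, PySem.Int.floordiv_eq_ediv_of_pos (by norm_num)]
  omega

-- ===== VERDICT (by name: the statement is the Claim_ definition above) =====
theorem solution_spec : Claim_equal_solution := by
  intro price money count _
  unfold Spec_solution solution solution_alt
  simp only [pv_sum_eq]
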